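-- pv_equiv track=rewrite | github.com/ashfyx716/WellNest | wellnest_ml/services/lda_service.py | get_topic_label
-- ===== SOURCE A (Python) =====
-- TOPIC_LABELS = {
--     frozenset(["family", "mother", "children", "home", "husband", "kids",
--                "house", "cook", "chores", "care"]): ("Family Responsibilities", "🏠"),
--     frozenset(["sleep", "tired", "rest", "awake", "night", "morning",
--                "wake", "insomnia", "exhausted"]): ("Sleep Difficulties", "🌙"),
--     frozenset(["work", "office", "job", "stress", "boss", "deadline",
--                "meeting", "career", "pressure"]): ("Work Pressure", "💼"),
--     frozenset(["health", "pain", "body", "doctor", "medicine", "headache",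
--                "back", "knee", "diet", "eat"]): ("Health Concerns", "🌿"),
--     frozenset(["lonely", "alone", "miss", "friend", "social", "talk",
--                "nobody", "isolated", "support"]): ("Emotional Isolation", "💕"),
--     frozenset(["happy", "grateful", "wonderful", "blessed", "enjoyed",
--                "loved", "peaceful", "calm", "joy"]): ("Positive Moments", "🌸"),
-- }
--
-- def get_topic_label(keywords: list) -> tuple:
--     keyword_set = set(str(k).lower() for k in keywords)
--     best_match = ("Personal Thoughts", "💭")
--     best_overlap = 0
--     for topic_keywords, (label, emoji) in TOPIC_LABELS.items():
--         overlap = len(keyword_set & topic_keywords)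
--         if overlap > best_overlap:
--             best_overlap = overlap
--             best_match = (label, emoji)
--     return best_match
-- ===== SOURCE B (Python) =====
-- TOPICS = [
--     (["family", "mother", "children", "home", "husband", "kids",
--       "house", "cook", "chores", "care"], "Family Responsibilities", "🏠"),
--     (["sleep", "tired", "rest", "awake", "night", "morning",
--       "wake", "insomnia", "exhausted"], "Sleep Difficulties", "🌙"),
--     (["work", "office", "job", "stress", "boss", "deadline",
--       "meeting", "career", "pressure"], "Work Pressure", "💼"),
--     (["health", "pain", "body", "doctor", "medicine", "headache",
--       "back", "knee", "diet", "eat"], "Health Concerns", "🌿"),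
--     (["lonely", "alone", "miss", "friend", "social", "talk",
--       "nobody", "isolated", "support"], "Emotional Isolation", "💕"),
--     (["happy", "grateful", "wonderful", "blessed", "enjoyed",
--       "loved", "peaceful", "calm", "joy"], "Positive Moments", "🌸"),
-- ]
--
-- # inverted index: keyword word -> list of (label, emoji) outputs containing it
-- _INDEX = {}
-- for _words, _label, _emoji in TOPICS:
--     for _w in _words:
--         _INDEX.setdefault(_w, []).append((_label, _emoji))
--
--
-- def get_topic_label(keywords: list) -> tuple:
--     votes = {}
--     for w in set(str(k).lower() for k in keywords):
--         for topic in _INDEX.get(w, []):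
--             votes[topic] = votes.get(topic, 0) + 1
--     best_match = ("Personal Thoughts", "💭")
--     best = 0
--     for _words, label, emoji in TOPICS:
--         c = votes.get((label, emoji), 0)
--         if c > best:
--             best = c
--             best_match = (label, emoji)
--     return best_match
-- ===== Notes on version B (the rewrite author's own statement) =====
-- stated objective: alternative
-- what changed: Replaces the per-topic set intersections with a prebuilt inverted index (word -> list of (label, emoji) topics containing it) and a single keyword-driven vote tally, followed by a selection pass over the topics in TOPIC_LABELS order.
import Mathlib
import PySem

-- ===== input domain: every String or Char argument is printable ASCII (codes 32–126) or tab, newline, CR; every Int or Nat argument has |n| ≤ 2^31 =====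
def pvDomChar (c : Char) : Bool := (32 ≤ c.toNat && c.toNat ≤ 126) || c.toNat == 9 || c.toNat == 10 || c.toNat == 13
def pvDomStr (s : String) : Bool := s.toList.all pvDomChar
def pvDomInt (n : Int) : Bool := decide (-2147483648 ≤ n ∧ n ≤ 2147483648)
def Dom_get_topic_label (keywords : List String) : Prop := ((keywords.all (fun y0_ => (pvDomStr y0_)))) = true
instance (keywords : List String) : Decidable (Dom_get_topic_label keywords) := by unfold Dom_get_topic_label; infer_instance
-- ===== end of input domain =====

-- B replaces A's per-topic set intersections by a prebuilt inverted index (word → topics) and a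
-- keyword-driven vote tally; same cost class, alternative structure.

-- The six topic keyword lists (module-level constant data shared by both ports).
def W0 : List String := ["family", "mother", "children", "home", "husband", "kids", "house", "cook", "chores", "care"]
def W1 : List String := ["sleep", "tired", "rest", "awake", "night", "morning", "wake", "insomnia", "exhausted"]
def W2 : List String := ["work", "office", "job", "stress", "boss", "deadline", "meeting", "career", "pressure"]
def W3 : List String := ["health", "pain", "body", "doctor", "medicine", "headache", "back", "knee", "diet", "eat"]
def W4 : List String := ["lonely", "alone", "miss", "friend", "social", "talk", "nobody", "isolated", "support"]
def W5 : List String := ["happy", "grateful", "wonderful", "blessed", "enjoyed", "loved", "peaceful", "calm", "joy"]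

-- ===== PORT A =====
-- TOPIC_LABELS : dict, iterated in insertion order as (frozenset, (label, emoji)) items.
def topicLabels : List (List String × (String × String)) :=
  [(W0, ("Family Responsibilities", "🏠")),
   (W1, ("Sleep Difficulties", "🌙")),
   (W2, ("Work Pressure", "💼")),
   (W3, ("Health Concerns", "🌿")),
   (W4, ("Emotional Isolation", "💕")),
   (W5, ("Positive Moments", "🌸"))]

def get_topic_label (keywords : List String) : String × String :=
  -- keyword_set = set(str(k).lower() for k in keywords)  (k is already a str, so str(k) = k)
  let keyword_set : PySem.Set String := PySem.Set.ofList (keywords.map (fun k => PySem.Str.lower k))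
  -- for topic_keywords, (label, emoji) in TOPIC_LABELS.items(): overlap = len(keyword_set & topic_keywords) …
  (topicLabels.foldl (fun acc t =>
      let overlap := PySem.Set.len (PySem.Set.inter keyword_set t.1)
      if overlap > acc.2 then (t.2, overlap) else acc)
    (("Personal Thoughts", "💭"), 0)).1

-- ===== PORT B =====
def topics : List (List String × String × String) :=
  [(W0, "Family Responsibilities", "🏠"),
   (W1, "Sleep Difficulties", "🌙"),
   (W2, "Work Pressure", "💼"),
   (W3, "Health Concerns", "🌿"),
   (W4, "Emotional Isolation", "💕"),
   (W5, "Positive Moments", "🌸")]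

-- _INDEX: inverted index word → list of (label, emoji); setdefault(w, []).append(p) = modify w [] (· ++ [p])
def invIndex : PySem.Dict String (List (String × String)) :=
  topics.foldl (fun d t => t.1.foldl (fun d w => d.modify w [] (fun l => l ++ [(t.2.1, t.2.2)])) d)
    PySem.Dict.empty

def get_topic_label_alt (keywords : List String) : String × String :=
  let ks : PySem.Set String := PySem.Set.ofList (keywords.map (fun k => PySem.Str.lower k))
  -- vote tally over the deduplicated keywords (votes is only looked up afterwards, so the
  -- Set's iteration order cannot influence the result)
  let votes : PySem.Dict (String × String) Int :=
    ks.foldl (fun v w => (invIndex.getD w []).foldl (fun v p => v.insert p (v.getD p 0 + 1)) v)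
      PySem.Dict.empty
  -- selection pass in TOPICS order, strict > from 0 (first maximum wins; default when best = 0)
  (topics.foldl (fun acc t =>
      let c := votes.getD (t.2.1, t.2.2) 0
      if c > acc.2 then ((t.2.1, t.2.2), c) else acc)
    (("Personal Thoughts", "💭"), 0)).1

-- ===== PRECONDITION & SPEC =====
def Spec_get_topic_label (keywords : List String) (out : String × String) : Prop := out = get_topic_label_alt keywords
instance (keywords : List String) (out : String × String) : Decidable (Spec_get_topic_label keywords out) := by unfold Spec_get_topic_label; infer_instance

-- ===== CLAIM (what is proved, stated in full; the proofs are below) =====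
def Claim_equal_get_topic_label : Prop := ∀ (keywords : List String), Dom_get_topic_label keywords → Spec_get_topic_label keywords (get_topic_label keywords)

-- ===== LEMMAS AND PROOFS =====

-- all 56 index keys, in first-occurrence (= topic) order
def KEYS : List String := ["family", "mother", "children", "home", "husband", "kids", "house", "cook", "chores", "care", "sleep", "tired", "rest", "awake", "night", "morning", "wake", "insomnia", "exhausted", "work", "office", "job", "stress", "boss", "deadline", "meeting", "career", "pressure", "health", "pain", "body", "doctor", "medicine", "headache", "back", "knee", "diet", "eat", "lonely", "alone", "miss", "friend", "social", "talk", "nobody", "isolated", "support", "happy", "grateful", "wonderful", "blessed", "enjoyed", "loved", "peaceful", "calm", "joy"]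

-- what the inverted index returns for an arbitrary word
def idxSpec (w : String) : List (String × String) :=
  (if W0.contains w then [("Family Responsibilities", "🏠")] else []) ++
  (if W1.contains w then [("Sleep Difficulties", "🌙")] else []) ++
  (if W2.contains w then [("Work Pressure", "💼")] else []) ++
  (if W3.contains w then [("Health Concerns", "🌿")] else []) ++
  (if W4.contains w then [("Emotional Isolation", "💕")] else []) ++
  (if W5.contains w then [("Positive Moments", "🌸")] else [])

set_option maxRecDepth 100000 in
theorem keys_invIndex : invIndex.keys = KEYS := by decide

set_option maxRecDepth 100000 in
theorem idx_eq (w : String) : invIndex.getD w [] = idxSpec w := by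
  by_cases hw : w ∈ KEYS
  · simp only [KEYS, List.mem_cons, List.not_mem_nil, or_false] at hw
    rcases hw with rfl|rfl|rfl|rfl|rfl|rfl|rfl|rfl|rfl|rfl|rfl|rfl|rfl|rfl|rfl|rfl|rfl|rfl|rfl|rfl|rfl|rfl|rfl|rfl|rfl|rfl|rfl|rfl|rfl|rfl|rfl|rfl|rfl|rfl|rfl|rfl|rfl|rfl|rfl|rfl|rfl|rfl|rfl|rfl|rfl|rfl|rfl|rfl|rfl|rfl|rfl|rfl|rfl|rfl|rfl|rfl <;> decide
  · have hc : invIndex.contains w = false := by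
      rw [PySem.Dict.contains_eq_decide_mem_keys, keys_invIndex]
      simp [hw]
    rw [PySem.Dict.getD_of_not_contains _ _ hc]
    have h0 : w ∉ W0 := fun h => hw ((show W0 ⊆ KEYS by decide) h)
    have h1 : w ∉ W1 := fun h => hw ((show W1 ⊆ KEYS by decide) h)
    have h2 : w ∉ W2 := fun h => hw ((show W2 ⊆ KEYS by decide) h)
    have h3 : w ∉ W3 := fun h => hw ((show W3 ⊆ KEYS by decide) h)
    have h4 : w ∉ W4 := fun h => hw ((show W4 ⊆ KEYS by decide) h)
    have h5 : w ∉ W5 := fun h => hw ((show W5 ⊆ KEYS by decide) h)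
    simp [idxSpec, h0, h1, h2, h3, h4, h5]

theorem votes_getD (p : String × String) (ks : List String) (d : PySem.Dict (String × String) Int) :
    (ks.foldl (fun v w => (invIndex.getD w []).foldl (fun v q => v.insert q (v.getD q 0 + 1)) v) d).getD p 0
      = d.getD p 0 + ((ks.map (fun w => ((invIndex.getD w []).count p : Int))).sum) := by
  induction ks generalizing d with
  | nil => simp only [List.foldl_nil, List.map_nil, List.sum_nil, add_zero]
  | cons w t ih =>
    simp only [List.foldl_cons, List.map_cons, List.sum_cons]
    rw [ih, PySem.Dict.getD_foldl_insert_add_one]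
    ring

theorem score_eq (W : List String) (pr : String × String)
    (hpt : ∀ w : String, ((idxSpec w).count pr : Int) = if W.contains w then 1 else 0)
    (K : List String) :
    (K.foldl (fun v w => (invIndex.getD w []).foldl (fun v q => v.insert q (v.getD q 0 + 1)) v)
        PySem.Dict.empty).getD pr 0
      = PySem.Set.len (PySem.Set.inter K W) := by
  rw [votes_getD]
  have hmap : K.map (fun w => ((invIndex.getD w []).count pr : Int))
      = K.map (fun w => if W.contains w then (1 : Int) else 0) := by
    apply List.map_congr_left
    intro w _
    rw [idx_eq]; exact hpt w
  rw [hmap, PySem.List.sum_map_ite_one_zero, PySem.Dict.getD_empty, zero_add]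
  simp only [PySem.Set.len, PySem.Set.inter, List.countP_eq_length_filter,
    PySem.Set.contains_eq_listContains]

theorem pt0 (w : String) : (((idxSpec w).count ("Family Responsibilities", "🏠") : Int)) = if W0.contains w then 1 else 0 := by
  unfold idxSpec
  repeat rw [List.count_append]
  split_ifs <;> simp_all

theorem pt1 (w : String) : (((idxSpec w).count ("Sleep Difficulties", "🌙") : Int)) = if W1.contains w then 1 else 0 := by
  unfold idxSpec
  repeat rw [List.count_append]
  split_ifs <;> simp_all

theorem pt2 (w : String) : (((idxSpec w).count ("Work Pressure", "💼") : Int)) = if W2.contains w then 1 else 0 := by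
  unfold idxSpec
  repeat rw [List.count_append]
  split_ifs <;> simp_all

theorem pt3 (w : String) : (((idxSpec w).count ("Health Concerns", "🌿") : Int)) = if W3.contains w then 1 else 0 := by
  unfold idxSpec
  repeat rw [List.count_append]
  split_ifs <;> simp_all

theorem pt4 (w : String) : (((idxSpec w).count ("Emotional Isolation", "💕") : Int)) = if W4.contains w then 1 else 0 := by
  unfold idxSpec
  repeat rw [List.count_append]
  split_ifs <;> simp_all

theorem pt5 (w : String) : (((idxSpec w).count ("Positive Moments", "🌸") : Int)) = if W5.contains w then 1 else 0 := by
  unfold idxSpec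
  repeat rw [List.count_append]
  split_ifs <;> simp_all

theorem get_topic_label_spec : Claim_equal_get_topic_label := by
  intro ks _
  unfold Spec_get_topic_label
  simp only [get_topic_label, get_topic_label_alt, topicLabels, topics,
    List.foldl_cons, List.foldl_nil]
  rw [score_eq W0 ("Family Responsibilities", "🏠") pt0,
      score_eq W1 ("Sleep Difficulties", "🌙") pt1,
      score_eq W2 ("Work Pressure", "💼") pt2,
      score_eq W3 ("Health Concerns", "🌿") pt3,
      score_eq W4 ("Emotional Isolation", "💕") pt4,
      score_eq W5 ("Positive Moments", "🌸") pt5]
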